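-- pv_equiv track=rewrite | github.com/joshanashakya/dissertation | workspace/dataset/java-python/GeeksForGeeks/206/A/2.py | findMinimumElements
-- ===== SOURCE A (Python) =====
-- def gcdFunc(a, b):
--     if (b == 0):
--         return a
--
--     return gcdFunc(b, a % b)
--
-- def findMinimumElements(a, n):
--     b = [0]*(n - 1)
--
--     # Difference array of consecutive
--     # elements of the array
--     for i in range(1,n):
--         b[i - 1] = a[i] - a[i - 1]
--
--     gcd = b[0]
--
--     # GCD of the difference array
--     for i in range(n-1):
--         gcd = gcdFunc(gcd, b[i])
--
--     ans = 0
--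
--     # Loop to calculate the minimum
--     # number of elements required
--     for i in range(n-1):
--         ans += (b[i] // gcd) - 1
--
--     return ans
-- ===== SOURCE B (Python) =====
-- def findMinimumElements(a, n):
--     g = 0
--     for i in range(1, n):
--         x = a[i] - a[i - 1]
--         while x != 0:
--             g, x = x, g % x
--     return (a[n - 1] - a[0]) // g - (n - 1)
-- ===== Notes on version B (the rewrite author's own statement) =====
-- stated objective: simpler
-- what changed: B folds an inline iterative Euclid over consecutive differences in one pass (no difference array, no recursive gcd helper) and replaces A's whole summation loop by the telescoping closed form (a[n-1]-a[0])//gcd - (n-1).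
import Mathlib
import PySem

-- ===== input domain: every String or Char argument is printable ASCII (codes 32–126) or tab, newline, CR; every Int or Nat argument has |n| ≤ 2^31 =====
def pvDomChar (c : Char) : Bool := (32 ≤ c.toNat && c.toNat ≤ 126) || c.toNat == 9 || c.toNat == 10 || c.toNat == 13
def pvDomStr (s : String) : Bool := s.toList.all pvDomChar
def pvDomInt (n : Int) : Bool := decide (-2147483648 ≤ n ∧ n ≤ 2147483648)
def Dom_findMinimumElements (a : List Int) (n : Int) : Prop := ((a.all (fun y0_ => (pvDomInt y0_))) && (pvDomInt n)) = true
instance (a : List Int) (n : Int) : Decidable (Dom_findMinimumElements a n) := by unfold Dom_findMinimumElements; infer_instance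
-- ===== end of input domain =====

-- B simplifies A: one pass over consecutive differences (no difference array) with an inline
-- iterative Euclid, and the final summation loop replaced by the telescoping closed form.

-- termination helper for the Euclid recursions (cited by both ports' decreasing_by)
theorem pvModAbs_lt (a b : Int) (hb : ¬ b = 0) : (PySem.Int.mod a b).natAbs < b.natAbs := by
  rcases lt_or_gt_of_ne hb with h | h
  · have h2 := PySem.Int.mod_neg_bounds a h
    omega
  · have h1 := PySem.Int.mod_nonneg a h
    have h2 := PySem.Int.mod_lt a h
    omega

-- ===== PORT A =====
def gcdFunc (a b : Int) : Int :=
  if b = 0 then a else gcdFunc b (PySem.Int.mod a b)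
termination_by b.natAbs
decreasing_by exact pvModAbs_lt a b (by assumption)

def findMinimumElements (a : List Int) (n : Int) : Int :=
  let b0 : List Int := List.replicate (n - 1).toNat 0
  let b := (PySem.List.pyRange 1 n 1).foldl
    (fun bl i => PySem.List.pySetD bl (i - 1)
      (PySem.List.pyGetD a i 0 - PySem.List.pyGetD a (i - 1) 0)) b0
  let gcd0 := PySem.List.pyGetD b 0 0
  let gcd := (PySem.List.pyRange 0 (n - 1) 1).foldl
    (fun g i => gcdFunc g (PySem.List.pyGetD b i 0)) gcd0
  (PySem.List.pyRange 0 (n - 1) 1).foldl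
    (fun ans i => ans + (PySem.Int.floordiv (PySem.List.pyGetD b i 0) gcd - 1)) 0

-- ===== PORT B =====
-- the inline `while x != 0: g, x = x, g % x` loop of Source B
def pyWhileGcd (g x : Int) : Int :=
  if x = 0 then g else pyWhileGcd x (PySem.Int.mod g x)
termination_by x.natAbs
decreasing_by exact pvModAbs_lt g x (by assumption)

def findMinimumElements_alt (a : List Int) (n : Int) : Int :=
  let g := (PySem.List.pyRange 1 n 1).foldl
    (fun g i => pyWhileGcd g (PySem.List.pyGetD a i 0 - PySem.List.pyGetD a (i - 1) 0)) 0
  PySem.Int.floordiv (PySem.List.pyGetD a (n - 1) 0 - PySem.List.pyGetD a 0 0) g - (n - 1)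

-- ===== PRECONDITION & SPEC =====
-- Pre_ is exactly where the Python A returns: n ≥ 2 and n ≤ len(a) (else IndexError), and some
-- consecutive difference among the first n elements is nonzero (else gcd = 0, ZeroDivisionError).
def Pre_findMinimumElements (a : List Int) (n : Int) : Prop :=
  2 ≤ n ∧ n ≤ (a.length : Int) ∧
  ∃ i < n.toNat, 1 ≤ i ∧ a.getD i 0 ≠ a.getD (i - 1) 0
instance (a : List Int) (n : Int) : Decidable (Pre_findMinimumElements a n) := by
  unfold Pre_findMinimumElements; infer_instance

def pvWitness_findMinimumElements : List Int × Int := ([1, 3, 9], 3)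

def Spec_findMinimumElements (a : List Int) (n : Int) (out : Int) : Prop := out = findMinimumElements_alt a n
instance (a : List Int) (n : Int) (out : Int) : Decidable (Spec_findMinimumElements a n out) := by unfold Spec_findMinimumElements; infer_instance

-- ===== CLAIM (what is proved, stated in full; the proofs are below) =====
def Claim_equal_findMinimumElements : Prop := ∀ (a : List Int) (n : Int), Dom_findMinimumElements a n → Pre_findMinimumElements a n → Spec_findMinimumElements a n (findMinimumElements a n)

-- ===== LEMMAS AND PROOFS =====


theorem gcdFunc_dvd (a b : Int) : gcdFunc a b ∣ a ∧ gcdFunc a b ∣ b := by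
  by_cases hb : b = 0
  · rw [gcdFunc]; simp [hb]
  · have ih := gcdFunc_dvd b (PySem.Int.mod a b)
    rw [gcdFunc, if_neg hb]
    refine ⟨?_, ih.1⟩
    have h := PySem.Int.floordiv_mul_add_mod a b
    have : gcdFunc b (PySem.Int.mod a b) ∣ PySem.Int.floordiv a b * b + PySem.Int.mod a b :=
      dvd_add (Dvd.dvd.mul_left ih.1 _) ih.2
    rwa [h] at this
termination_by b.natAbs
decreasing_by exact pvModAbs_lt a b hb

theorem gcdFunc_zero (a b : Int) (h : gcdFunc a b = 0) : a = 0 ∧ b = 0 := by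
  by_cases hb : b = 0
  · rw [gcdFunc, if_pos hb] at h; exact ⟨h, hb⟩
  · rw [gcdFunc, if_neg hb] at h
    exact absurd (gcdFunc_zero b (PySem.Int.mod a b) h).1 hb
termination_by b.natAbs
decreasing_by exact pvModAbs_lt a b hb

theorem gcdFunc_self (x : Int) : gcdFunc x x = x := by
  by_cases hx : x = 0
  · rw [gcdFunc]; simp [hx]
  · rw [gcdFunc, if_neg hx, (PySem.Int.mod_eq_zero_iff_dvd x x).2 dvd_rfl, gcdFunc, if_pos rfl]

theorem gcdFunc_zero_left (x : Int) : gcdFunc 0 x = x := by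
  by_cases hx : x = 0
  · rw [gcdFunc]; simp [hx]
  · rw [gcdFunc, if_neg hx, (PySem.Int.mod_eq_zero_iff_dvd 0 x).2 (dvd_zero x), gcdFunc, if_pos rfl]

theorem pyWhileGcd_eq (g x : Int) : pyWhileGcd g x = gcdFunc g x := by
  by_cases hx : x = 0
  · rw [pyWhileGcd, gcdFunc, if_pos hx, if_pos hx]
  · rw [pyWhileGcd, gcdFunc, if_neg hx, if_neg hx]
    exact pyWhileGcd_eq x (PySem.Int.mod g x)
termination_by x.natAbs
decreasing_by exact pvModAbs_lt g x hx

theorem foldl_gcd_dvd (l : List Int) (g : Int) :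
    (l.foldl gcdFunc g ∣ g) ∧ ∀ x ∈ l, l.foldl gcdFunc g ∣ x := by
  induction l generalizing g with
  | nil => simp
  | cons y t ih =>
    have h := ih (gcdFunc g y)
    refine ⟨h.1.trans (gcdFunc_dvd g y).1, ?_⟩
    intro x hx
    rcases List.mem_cons.1 hx with rfl | hx
    · exact (h.1).trans (gcdFunc_dvd g x).2
    · exact h.2 x hx

theorem foldl_gcd_zero (l : List Int) (g : Int) (h : l.foldl gcdFunc g = 0) :
    g = 0 ∧ ∀ x ∈ l, x = 0 := by
  induction l generalizing g with
  | nil => simpa using h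
  | cons y t ih =>
    have h2 := ih (gcdFunc g y) h
    have h3 := gcdFunc_zero g y h2.1
    refine ⟨h3.1, ?_⟩
    intro x hx
    rcases List.mem_cons.1 hx with rfl | hx
    · exact h3.2
    · exact h2.2 x hx

theorem floordiv_mul_cancel (G u : Int) (hG : G ≠ 0) : PySem.Int.floordiv (G * u) G = u := by
  have h := PySem.Int.floordiv_mul_add_mod (G * u) G
  have hm : PySem.Int.mod (G * u) G = 0 := (PySem.Int.mod_eq_zero_iff_dvd _ _).2 ⟨u, rfl⟩
  rw [hm, add_zero] at h
  have := mul_right_cancel₀ hG (h.trans (mul_comm G u))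
  exact this

theorem sumFold (G : Int) (hG : G ≠ 0) (l : List Int) (hd : ∀ x ∈ l, G ∣ x) (s : Int) :
    l.foldl (fun s x => s + (PySem.Int.floordiv x G - 1)) s
      = s + PySem.Int.floordiv l.sum G - l.length := by
  induction l generalizing s with
  | nil =>
    have : PySem.Int.floordiv 0 G = 0 := by
      have := floordiv_mul_cancel G 0 hG; simpa using this
    simp [this]
  | cons y t ih =>
    obtain ⟨u, hu⟩ := hd y (List.mem_cons_self ..)
    obtain ⟨v, hv⟩ := List.dvd_sum (fun x hx => hd x (List.mem_cons_of_mem _ hx))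
    simp only [List.foldl_cons, List.sum_cons, List.length_cons]
    rw [ih (fun x hx => hd x (List.mem_cons_of_mem _ hx))]
    have h1 : y + t.sum = G * (u + v) := by rw [hu, hv]; ring
    rw [h1, floordiv_mul_cancel _ _ hG, hu, floordiv_mul_cancel _ _ hG, hv, floordiv_mul_cancel _ _ hG]
    push_cast
    ring

-- the difference list of the first m+1 elements, read with getD
def dsL (a : List Int) (m : Nat) : List Int :=
  (List.range m).map (fun j => a.getD (j + 1) 0 - a.getD j 0)

theorem dsL_sum (a : List Int) (m : Nat) : (dsL a m).sum = a.getD m 0 - a.getD 0 0 := by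
  induction m with
  | zero => simp [dsL]
  | succ k ih =>
    rw [dsL, List.range_succ, List.map_append, List.sum_append, ← dsL, ih]
    simp

theorem dsL_build (a : List Int) (m : Nat) :
    ∀ k ≤ m, (List.range k).foldl
      (fun bl j => bl.set j (a.getD (j + 1) 0 - a.getD j 0)) (List.replicate m 0)
      = dsL a k ++ List.replicate (m - k) 0 := by
  intro k hk
  induction k with
  | zero => simp [dsL]
  | succ j ih =>
    rw [List.range_succ, List.foldl_append, ih (by omega)]
    have hrep : List.replicate (m - j) (0 : Int) = 0 :: List.replicate (m - (j + 1)) 0 := by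
      have : m - j = (m - (j + 1)) + 1 := by omega
      rw [this, List.replicate_succ]
    have hlen : (dsL a j).length = j := by simp [dsL]
    simp only [List.foldl_cons, List.foldl_nil, hrep]
    rw [List.set_append_right _ _ (by omega), hlen]
    simp [dsL, List.range_succ]

theorem dsL_cons (a : List Int) (r : Nat) :
    dsL a (r + 1) = (a.getD 1 0 - a.getD 0 0)
      :: (List.range r).map (fun j => a.getD (j + 2) 0 - a.getD (j + 1) 0) := by
  rw [dsL, List.range_succ_eq_map, List.map_cons, List.map_map]
  simp [Function.comp_def, Nat.succ_eq_add_one]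
theorem main_eq (a : List Int) (n : Int) (hn2 : 2 ≤ n)
    (hne : ∃ i < n.toNat, 1 ≤ i ∧ a.getD i 0 ≠ a.getD (i - 1) 0) :
    findMinimumElements a n = findMinimumElements_alt a n := by
  obtain ⟨i, hilt, hi1, hine⟩ := hne
  set m : Nat := (n - 1).toNat with hm
  have hm1 : 1 ≤ m := by omega
  have hmn : (m : Int) = n - 1 := by omega
  set r : Nat := m - 1 with hr
  have hmr : m = r + 1 := by omega
  set d0 : Int := a.getD 1 0 - a.getD 0 0 with hd0
  set rest : List Int := (List.range r).map (fun j => a.getD (j + 2) 0 - a.getD (j + 1) 0) with hrest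
  have hds : dsL a m = d0 :: rest := by rw [hmr]; exact dsL_cons a r
  set G : Int := rest.foldl gcdFunc d0 with hG
  -- A's difference array b equals dsL a m
  have hA_b : (PySem.List.pyRange 1 n 1).foldl
      (fun bl i => PySem.List.pySetD bl (i - 1)
        (PySem.List.pyGetD a i 0 - PySem.List.pyGetD a (i - 1) 0))
      (List.replicate (n - 1).toNat 0) = dsL a m := by
    rw [PySem.List.pyRange_one, List.foldl_map, ← hm]
    have hfun : (fun (bl : List Int) (k : Nat) =>
        PySem.List.pySetD bl ((1 + (k : Int)) - 1)
          (PySem.List.pyGetD a (1 + (k : Int)) 0 - PySem.List.pyGetD a ((1 + (k : Int)) - 1) 0))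
        = fun bl k => bl.set k (a.getD (k + 1) 0 - a.getD k 0) := by
      funext bl k
      have e1 : (1 + (k : Int)) - 1 = ((k : Nat) : Int) := by omega
      have e2 : (1 + (k : Int)) = (((k + 1 : Nat)) : Int) := by omega
      rw [e1, e2, PySem.List.pySetD_natCast, PySem.List.pyGetD_natCast, PySem.List.pyGetD_natCast]
    rw [hfun]
    have := dsL_build a m m (le_refl m)
    simpa using this
  -- divisibility and nonzeroness of G
  have hdvd : ∀ x ∈ dsL a m, G ∣ x := by
    intro x hx
    rw [hds] at hx
    have h := foldl_gcd_dvd rest d0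
    rcases List.mem_cons.1 hx with rfl | hx
    · exact h.1
    · exact h.2 x hx
  have hGne : G ≠ 0 := by
    intro h0
    have hall := foldl_gcd_zero rest d0 h0
    have hallds : ∀ x ∈ dsL a m, x = 0 := by
      intro x hx
      rw [hds] at hx
      rcases List.mem_cons.1 hx with rfl | hx
      · exact hall.1
      · exact hall.2 x hx
    have hjm : i - 1 < m := by omega
    have hmem : a.getD ((i - 1) + 1) 0 - a.getD (i - 1) 0 ∈ dsL a m :=
      List.mem_map.2 ⟨i - 1, List.mem_range.2 hjm, rfl⟩
    have hi : (i - 1) + 1 = i := by omega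
    rw [hi] at hmem
    exact hine (by have := hallds _ hmem; omega)
  -- unfold both ports
  simp only [findMinimumElements, findMinimumElements_alt]
  rw [hA_b]
  -- the two index folds over b read dsL a m
  have hlends : ((dsL a m).length : Int) = n - 1 := by simp [dsL]; omega
  rw [show (n - 1 : Int) = ((dsL a m).length : Int) from hlends.symm]
  rw [PySem.List.foldl_pyRange_zero_pyGetD' (dsL a m) 0 gcdFunc]
  -- A's gcd is G
  have hgcd0 : PySem.List.pyGetD (dsL a m) 0 0 = d0 := by
    rw [hds, PySem.List.pyGetD_zero_cons]
  rw [hgcd0, hds, List.foldl_cons, gcdFunc_self, ← hds, ← hG]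
  rw [PySem.List.foldl_pyRange_zero_pyGetD' (dsL a m) 0
        (fun s x => s + (PySem.Int.floordiv x G - 1)) 0]
  -- A's answer via the telescoping sum
  rw [sumFold G hGne (dsL a m) hdvd 0, dsL_sum]
  -- B's gcd is G
  have hB_g : (PySem.List.pyRange 1 n 1).foldl
      (fun g i => pyWhileGcd g (PySem.List.pyGetD a i 0 - PySem.List.pyGetD a (i - 1) 0)) 0 = G := by
    rw [PySem.List.pyRange_one, List.foldl_map, ← hm]
    have hfun : (fun (g : Int) (k : Nat) =>
        pyWhileGcd g (PySem.List.pyGetD a (1 + (k : Int)) 0 - PySem.List.pyGetD a ((1 + (k : Int)) - 1) 0))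
        = fun g k => gcdFunc g (a.getD (k + 1) 0 - a.getD k 0) := by
      funext g k
      have e1 : (1 + (k : Int)) - 1 = ((k : Nat) : Int) := by omega
      have e2 : (1 + (k : Int)) = (((k + 1 : Nat)) : Int) := by omega
      rw [e1, e2, PySem.List.pyGetD_natCast, PySem.List.pyGetD_natCast, pyWhileGcd_eq]
    rw [hfun, show (List.range m).foldl (fun g k => gcdFunc g (a.getD (k + 1) 0 - a.getD k 0)) 0
          = (dsL a m).foldl gcdFunc 0 from (List.foldl_map ..).symm,
        hds, List.foldl_cons, gcdFunc_zero_left, ← hG]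
  rw [hB_g]
  -- B's endpoints
  have hend : PySem.List.pyGetD a (((dsL a m).length : Nat) : Int) 0 = a.getD m 0 := by
    have hl : (dsL a m).length = m := by simp [dsL]
    rw [hl, PySem.List.pyGetD_natCast]
  have h0 : PySem.List.pyGetD a 0 0 = a.getD 0 0 := PySem.List.pyGetD_zero a 0
  rw [hend, h0]
  ring

-- ===== VERDICT (by name: the statement is the Claim_ definition above) =====
theorem findMinimumElements_spec : Claim_equal_findMinimumElements := by
  intro a n _ hpre
  obtain ⟨hn2, _, hne⟩ := hpre
  unfold Spec_findMinimumElements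
  exact main_eq a n hn2 hne
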